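-- pv_equiv track=rewrite | github.com/catenax-ng/product-registry-twin-check | twin_check.py | check_optional_Id_in_specificAssetId
-- ===== SOURCE A (Python) =====
-- from enum import Enum
--
-- class Check(Enum):
--     """Class for an Check Enumerations for passing or failing a check.
--     """
--     PASSED = 1
--     FAILED = 2
--
-- def check_optional_Id_in_specificAssetId(twin, id):
--     """This checks if a ID exists in specificAssetIds and is written correctly with camel case
--
--     :param twin: digital twin
--     :type twin: dict
--     :return: tuple check result, info
--     :rtype: tuple(string, string)
--     """
--
--     valid_key = id
--     result = ''
--     info = ''
--     shell = twin['shell']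
--
--     valid_key_found = [x for x in shell['specificAssetIds']
--                        if x['key'].lower() == valid_key.lower()]
--     valid_key_correct = [x for x in shell['specificAssetIds'] if x['key'].lower(
--     ) == valid_key.lower() and x['key'] == valid_key]
--
--     if len(valid_key_found) > 0 and len(valid_key_correct) > 0:
--         result = Check.PASSED.name
--     elif len(valid_key_found) > 0 and len(valid_key_correct) < 1:
--         info = f"key does not fit to expected format: {id}"
--         result = Check.FAILED.name
--     elif len(valid_key_found) < 1:
--         info = ''
--         result = ''
--
--     return result, info
-- ===== SOURCE B (Python) =====
-- def check_optional_Id_in_specificAssetId(twin, id):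
--     """Single pass over specificAssetIds maintaining two booleans instead of
--     building two filtered lists."""
--     valid_key = id
--     target = valid_key.lower()
--     found = False
--     exact = False
--     for x in twin['shell']['specificAssetIds']:
--         k = x['key']
--         if k.lower() == target:
--             found = True
--             if k == valid_key:
--                 exact = True
--     if found and exact:
--         return 'PASSED', ''
--     if found:
--         return 'FAILED', f"key does not fit to expected format: {id}"
--     return '', ''
-- ===== Notes on version B (the rewrite author's own statement) =====
-- stated objective: simpler
-- what changed: A builds two filtered lists over specificAssetIds (two comprehensions) and branches on their lengths; B makes one pass maintaining two booleans (found/exact) and branches on them.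
import Mathlib
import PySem

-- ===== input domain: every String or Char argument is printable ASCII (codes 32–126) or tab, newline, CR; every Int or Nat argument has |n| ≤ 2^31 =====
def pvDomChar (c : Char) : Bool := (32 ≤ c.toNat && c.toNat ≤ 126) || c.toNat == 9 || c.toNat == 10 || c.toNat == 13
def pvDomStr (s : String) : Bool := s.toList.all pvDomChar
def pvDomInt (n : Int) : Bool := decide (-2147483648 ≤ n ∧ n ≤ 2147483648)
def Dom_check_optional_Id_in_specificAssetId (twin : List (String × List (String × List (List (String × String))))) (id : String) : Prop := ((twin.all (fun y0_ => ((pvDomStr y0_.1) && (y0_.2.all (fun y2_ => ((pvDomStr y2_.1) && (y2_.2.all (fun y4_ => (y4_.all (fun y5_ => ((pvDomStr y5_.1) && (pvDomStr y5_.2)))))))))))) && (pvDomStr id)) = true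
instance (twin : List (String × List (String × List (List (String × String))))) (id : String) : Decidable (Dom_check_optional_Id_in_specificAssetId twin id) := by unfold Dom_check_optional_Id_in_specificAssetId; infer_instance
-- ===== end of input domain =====

-- B replaces A's two list comprehensions over specificAssetIds with one pass keeping two booleans.


-- ===== PORT A =====
-- dict lookup primitive shared by both ports (Python's d[k]: first match, none = KeyError)
def pvGetKey {V : Type} (d : List (String × V)) (k : String) : Option V :=
  PySem.Dict.get? ⟨d⟩ k

def check_optional_Id_in_specificAssetId (twin : List (String × List (String × List (List (String × String))))) (id : String) : String × String :=
  let valid_key := id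
  let shell := (pvGetKey twin "shell").getD []
  let ids := (pvGetKey shell "specificAssetIds").getD []
  let valid_key_found := ids.filter (fun x =>
    PySem.Str.lower ((pvGetKey x "key").getD "") == PySem.Str.lower valid_key)
  let valid_key_correct := ids.filter (fun x =>
    PySem.Str.lower ((pvGetKey x "key").getD "") == PySem.Str.lower valid_key
      && (pvGetKey x "key").getD "" == valid_key)
  if valid_key_found.length > 0 ∧ valid_key_correct.length > 0 then
    ("PASSED", "")
  else if valid_key_found.length > 0 ∧ valid_key_correct.length < 1 then
    ("FAILED", "key does not fit to expected format: " ++ id)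
  else if valid_key_found.length < 1 then
    ("", "")
  else
    ("", "")

-- ===== PORT B =====
def check_optional_Id_in_specificAssetId_alt (twin : List (String × List (String × List (List (String × String))))) (id : String) : String × String :=
  let valid_key := id
  let target := PySem.Str.lower valid_key
  let ids := (pvGetKey ((pvGetKey twin "shell").getD []) "specificAssetIds").getD []
  let fe := ids.foldl (fun (acc : Bool × Bool) x =>
    let k := (pvGetKey x "key").getD ""
    if PySem.Str.lower k == target then (true, acc.2 || (k == valid_key)) else acc)
    (false, false)
  if fe.1 && fe.2 then ("PASSED", "")
  else if fe.1 then ("FAILED", "key does not fit to expected format: " ++ id)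
  else ("", "")

-- ===== PRECONDITION & SPEC =====
-- Pre_ excludes exactly the inputs on which the Python A raises KeyError:
-- missing 'shell', missing 'specificAssetIds', or an element without 'key'.
def pvPreB (twin : List (String × List (String × List (List (String × String))))) : Bool :=
  match pvGetKey twin "shell" with
  | none => false
  | some shell =>
    match pvGetKey shell "specificAssetIds" with
    | none => false
    | some ids => ids.all (fun x => (pvGetKey x "key").isSome)

def Pre_check_optional_Id_in_specificAssetId (twin : List (String × List (String × List (List (String × String))))) (id : String) : Prop :=
  pvPreB twin = true
instance (twin : List (String × List (String × List (List (String × String))))) (id : String) : Decidable (Pre_check_optional_Id_in_specificAssetId twin id) := by unfold Pre_check_optional_Id_in_specificAssetId; infer_instance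

def pvWitness_check_optional_Id_in_specificAssetId : (List (String × List (String × List (List (String × String))))) × String :=
  ([("shell", [("specificAssetIds", [[("key", "BPN")], [("key", "bpn")]])])], "Bpn")

def Spec_check_optional_Id_in_specificAssetId (twin : List (String × List (String × List (List (String × String))))) (id : String) (out : String × String) : Prop := out = check_optional_Id_in_specificAssetId_alt twin id
instance (twin : List (String × List (String × List (List (String × String))))) (id : String) (out : String × String) : Decidable (Spec_check_optional_Id_in_specificAssetId twin id out) := by unfold Spec_check_optional_Id_in_specificAssetId; infer_instance

-- ===== CLAIM (what is proved, stated in full; the proofs are below) =====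
def Claim_equal_check_optional_Id_in_specificAssetId : Prop := ∀ (twin : List (String × List (String × List (List (String × String))))) (id : String), Dom_check_optional_Id_in_specificAssetId twin id → Pre_check_optional_Id_in_specificAssetId twin id → Spec_check_optional_Id_in_specificAssetId twin id (check_optional_Id_in_specificAssetId twin id)

-- ===== LEMMAS AND PROOFS =====
-- B's fold computes exactly "any case-insensitive match" and "any exact match among them".
lemma foldl_found_exact (ids : List (List (String × String))) (valid_key target : String)
    (f0 e0 : Bool) :
    ids.foldl (fun (acc : Bool × Bool) x =>
      let k := (pvGetKey x "key").getD ""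
      if PySem.Str.lower k == target then (true, acc.2 || (k == valid_key)) else acc)
      (f0, e0)
    = (f0 || ids.any (fun x => PySem.Str.lower ((pvGetKey x "key").getD "") == target),
       e0 || ids.any (fun x => (PySem.Str.lower ((pvGetKey x "key").getD "") == target)
                      && ((pvGetKey x "key").getD "" == valid_key))) := by
  induction ids generalizing f0 e0 with
  | nil => simp
  | cons x rest ih =>
    rw [List.foldl_cons]
    by_cases h : (PySem.Str.lower ((pvGetKey x "key").getD "") == target) = true
    · show List.foldl _ (if PySem.Str.lower ((pvGetKey x "key").getD "") == target
          then (true, e0 || ((pvGetKey x "key").getD "" == valid_key)) else (f0, e0)) rest = _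
      rw [if_pos h, ih]
      simp [h, Bool.or_assoc]
    · show List.foldl _ (if PySem.Str.lower ((pvGetKey x "key").getD "") == target
          then (true, e0 || ((pvGetKey x "key").getD "" == valid_key)) else (f0, e0)) rest = _
      rw [if_neg h, ih]
      simp only [Bool.not_eq_true] at h
      simp [h]

lemma filter_pos_iff_any {α : Type} (p : α → Bool) (xs : List α) :
    (0 < (xs.filter p).length) ↔ xs.any p = true := by
  simp [List.length_pos_iff, List.filter_eq_nil_iff, List.any_eq_true]

-- ===== VERDICT (by name: the statement is the Claim_ definition above) =====
theorem check_optional_Id_in_specificAssetId_spec : Claim_equal_check_optional_Id_in_specificAssetId := by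
  intro twin id _ _
  unfold Spec_check_optional_Id_in_specificAssetId
  unfold check_optional_Id_in_specificAssetId check_optional_Id_in_specificAssetId_alt
  simp only [foldl_found_exact, Bool.false_or]
  set ids := (pvGetKey ((pvGetKey twin "shell").getD []) "specificAssetIds").getD [] with hids
  set pF := fun x : List (String × String) =>
    PySem.Str.lower ((pvGetKey x "key").getD "") == PySem.Str.lower id with hpF
  set pC := fun x : List (String × String) =>
    (PySem.Str.lower ((pvGetKey x "key").getD "") == PySem.Str.lower id)
      && ((pvGetKey x "key").getD "" == id) with hpC
  have hF := filter_pos_iff_any pF ids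
  have hC := filter_pos_iff_any pC ids
  by_cases hf : ids.any pF = true
  · by_cases hc : ids.any pC = true
    · rw [if_pos ⟨hF.mpr hf, hC.mpr hc⟩]
      simp [hf, hc]
    · have hnc : ¬ 0 < (ids.filter pC).length := fun h => hc (hC.mp h)
      rw [if_neg (fun h => hnc h.2), if_pos ⟨hF.mpr hf, by omega⟩]
      simp only [Bool.not_eq_true] at hc
      simp [hf, hc]
  · have hc : ids.any pC = false := by
      cases h : ids.any pC with
      | false => rfl
      | true =>
        exfalso; apply hf
        simp only [List.any_eq_true] at h ⊢
        rcases h with ⟨x, hx, hpx⟩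
        exact ⟨x, hx, by simp only [hpC, Bool.and_eq_true] at hpx; exact hpx.1⟩
    have hnf : ¬ 0 < (ids.filter pF).length := fun h => by simp [hF.mp h] at hf
    rw [if_neg (fun h => hnf h.1), if_neg (fun h => hnf h.1), if_pos (by omega)]
    simp only [Bool.not_eq_true] at hf
    simp [hf, hc]
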